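-- pv_equiv track=rewrite | github.com/zhoubin930826-jpg/gupiao | backend/app/services/event_analysis_service.py | _resolve_tone
-- ===== SOURCE A (Python) =====
-- from typing import Any, Literal, Mapping
--
-- EventTone = Literal["positive", "neutral", "caution"]
--
-- def _resolve_tone(items: list[Mapping[str, Any]]) -> EventTone:
--     score = 0
--     for item in items:
--         tone = item.get("tone")
--         if tone == "positive":
--             score += 2
--         elif tone == "caution":
--             score -= 2
--     if score >= 2:
--         return "positive"
--     if score <= -2:
--         return "caution"
--     return "neutral"
-- ===== SOURCE B (Python) =====
-- def _resolve_tone(items):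
--     pos = sum(1 for item in items if item.get("tone") == "positive")
--     caution = sum(1 for item in items if item.get("tone") == "caution")
--     if pos > caution:
--         return "positive"
--     if caution > pos:
--         return "caution"
--     return "neutral"
-- ===== Notes on version B (the rewrite author's own statement) =====
-- stated objective: simpler
-- what changed: Replaces the signed +2/-2 score accumulator and the >=2/<=-2 thresholds by two direct tallies (positive and caution counts) compared against each other; correctness rests on score = 2*(pos - caution).
import Mathlib
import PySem

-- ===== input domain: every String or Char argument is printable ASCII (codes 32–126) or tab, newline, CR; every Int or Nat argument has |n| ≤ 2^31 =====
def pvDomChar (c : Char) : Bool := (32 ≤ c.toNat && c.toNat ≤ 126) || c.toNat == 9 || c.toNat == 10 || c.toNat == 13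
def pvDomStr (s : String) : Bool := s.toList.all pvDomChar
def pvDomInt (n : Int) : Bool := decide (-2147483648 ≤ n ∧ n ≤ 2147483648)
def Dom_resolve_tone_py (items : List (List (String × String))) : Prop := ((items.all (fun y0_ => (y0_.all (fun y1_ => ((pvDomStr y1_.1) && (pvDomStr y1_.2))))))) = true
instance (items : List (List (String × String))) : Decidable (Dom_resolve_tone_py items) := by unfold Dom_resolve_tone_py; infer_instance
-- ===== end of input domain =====

-- B replaces A's signed ±2 score accumulator with two direct tallies compared against each other (simpler decomposition).

-- ===== PORT A =====
def resolve_tone_py (items : List (List (String × String))) : String :=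
  let score : Int := items.foldl (fun score item =>
    let tone := PySem.Dict.get? (PySem.Dict.mk item) "tone"
    if tone == some "positive" then score + 2
    else if tone == some "caution" then score - 2
    else score) 0
  if score ≥ 2 then "positive"
  else if score ≤ -2 then "caution"
  else "neutral"

-- ===== PORT B =====
def resolve_tone_py_alt (items : List (List (String × String))) : String :=
  let pos : Int := items.countP (fun item => PySem.Dict.get? (PySem.Dict.mk item) "tone" == some "positive")
  let caution : Int := items.countP (fun item => PySem.Dict.get? (PySem.Dict.mk item) "tone" == some "caution")
  if pos > caution then "positive"
  else if caution > pos then "caution"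
  else "neutral"

-- ===== PRECONDITION & SPEC =====
def Spec_resolve_tone_py (items : List (List (String × String))) (out : String) : Prop := out = resolve_tone_py_alt items
instance (items : List (List (String × String))) (out : String) : Decidable (Spec_resolve_tone_py items out) := by unfold Spec_resolve_tone_py; infer_instance

-- ===== CLAIM (what is proved, stated in full; the proofs are below) =====
def Claim_equal_resolve_tone_py : Prop := ∀ (items : List (List (String × String))), Dom_resolve_tone_py items → Spec_resolve_tone_py items (resolve_tone_py items)

-- ===== LEMMAS AND PROOFS =====

-- A's running score equals twice the difference of B's two tallies.
theorem score_eq_counts (items : List (List (String × String))) (s : Int) :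
    items.foldl (fun score item =>
      let tone := PySem.Dict.get? (PySem.Dict.mk item) "tone"
      if tone == some "positive" then score + 2
      else if tone == some "caution" then score - 2
      else score) s
    = s + 2 * (items.countP (fun item => PySem.Dict.get? (PySem.Dict.mk item) "tone" == some "positive") : Int)
        - 2 * (items.countP (fun item => PySem.Dict.get? (PySem.Dict.mk item) "tone" == some "caution") : Int) := by
  induction items generalizing s with
  | nil => simp
  | cons hd tl ih =>
    simp only [List.foldl_cons, List.countP_cons, ih]
    by_cases hp : (PySem.Dict.get? (PySem.Dict.mk hd) "tone" == some "positive") = true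
    · have hc : (PySem.Dict.get? (PySem.Dict.mk hd) "tone" == some "caution") = false := by
        cases h : PySem.Dict.get? (PySem.Dict.mk hd) "tone" with
        | none => simp
        | some v =>
          simp only [h, beq_iff_eq, Option.some.injEq] at hp ⊢
          subst hp; decide
      simp [hp, hc]; ring
    · by_cases hc : (PySem.Dict.get? (PySem.Dict.mk hd) "tone" == some "caution") = true
      · simp [hp, hc]; ring
      · simp [hp, hc]

-- ===== VERDICT (by name: the statement is the Claim_ definition above) =====
theorem resolve_tone_py_spec : Claim_equal_resolve_tone_py := by
  intro items _
  unfold Spec_resolve_tone_py resolve_tone_py resolve_tone_py_alt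
  rw [score_eq_counts]
  set p := (items.countP (fun item => PySem.Dict.get? (PySem.Dict.mk item) "tone" == some "positive") : Int)
  set c := (items.countP (fun item => PySem.Dict.get? (PySem.Dict.mk item) "tone" == some "caution") : Int)
  by_cases h1 : p > c
  · rw [if_pos (by omega), if_pos h1]
  · by_cases h2 : c > p
    · rw [if_neg (by omega), if_pos (by omega), if_neg h1, if_pos h2]
    · rw [if_neg (by omega), if_neg (by omega), if_neg h1, if_neg h2]
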